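-- pv_equiv track=rewrite | github.com/X7kL2pR9mQ/X7kL2pR9mQ.github.io | rotate_publish.py | group_by_id
-- ===== SOURCE A (Python) =====
-- def group_by_id(items: list[tuple[str, int, str]]) -> dict[int, list[tuple[int, str]]]:
--     grouped: dict[int, list[tuple[int, str]]] = {i: [] for i in range(4)}
--     for mid, pid, rel in items:
--         gid = int(mid[-1])
--         grouped[gid].append((pid, rel))
--     for gid in grouped:
--         grouped[gid].sort(key=lambda x: x[0])
--     return grouped
-- ===== SOURCE B (Python) =====
-- def group_by_id(items: list[tuple[str, int, str]]) -> dict[int, list[tuple[int, str]]]: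
--     ordered = sorted(((int(mid[-1]), (pid, rel)) for mid, pid, rel in items),
--                      key=lambda e: e[1][0])
--     return {i: [p for g, p in ordered if g == i] for i in range(4)}
-- ===== Notes on version B (the rewrite author's own statement) =====
-- stated objective: simpler
-- what changed: Instead of mutating four bucket lists and then sorting each bucket, B tags every item with its group id, stable-sorts the whole tagged list by pid once, and builds the result dict by a comprehension that filters the globally sorted list per group (stability makes each filtered bucket sorted with A's exact tie order).
import Mathlib
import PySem

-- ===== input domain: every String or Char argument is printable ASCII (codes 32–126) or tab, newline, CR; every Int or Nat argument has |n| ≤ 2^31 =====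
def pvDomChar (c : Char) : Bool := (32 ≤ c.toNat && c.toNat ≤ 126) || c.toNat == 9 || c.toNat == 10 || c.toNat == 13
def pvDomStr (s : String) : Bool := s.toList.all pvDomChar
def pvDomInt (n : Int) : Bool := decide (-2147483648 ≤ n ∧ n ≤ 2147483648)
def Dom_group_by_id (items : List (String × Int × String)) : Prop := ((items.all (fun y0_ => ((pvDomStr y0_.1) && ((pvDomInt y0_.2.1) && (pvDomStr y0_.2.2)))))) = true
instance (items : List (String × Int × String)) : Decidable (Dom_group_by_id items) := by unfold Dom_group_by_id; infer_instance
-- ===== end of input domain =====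

-- B replaces A's mutate-four-buckets-then-sort-each-bucket by one global stable sort of
-- gid-tagged items plus a per-group filter comprehension (objective: simpler).


-- ===== PORT A =====
-- gid = int(mid[-1])  (none-defaulted to 0 where Python would raise; Pre_ excludes those inputs)
def pvGid (it : String × Int × String) : Int :=
  ((PySem.Str.pyGet? it.1 (-1)).bind (fun c => PySem.Int.ofChars? [c])).getD 0

def group_by_id (items : List (String × Int × String)) : List (Int × List (Int × String)) :=
  -- grouped = {i: [] for i in range(4)}
  let grouped : PySem.Dict Int (List (Int × String)) :=
    (PySem.List.pyRange 0 4 1).foldl (fun d i => d.insert i []) PySem.Dict.empty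
  -- for mid, pid, rel in items: grouped[int(mid[-1])].append((pid, rel))
  let grouped := items.foldl
    (fun d it => d.modify (pvGid it) [] (fun l => l ++ [(it.2.1, it.2.2)])) grouped
  -- for gid in grouped: grouped[gid].sort(key=lambda x: x[0])
  let grouped := grouped.keys.foldl
    (fun d gid => d.modify gid [] (fun l => PySem.List.sorted l (fun x => x.1) false)) grouped
  grouped.items

-- ===== PORT B =====
def group_by_id_alt (items : List (String × Int × String)) : List (Int × List (Int × String)) :=
  -- ordered = sorted(((int(mid[-1]), (pid, rel)) for mid, pid, rel in items), key=lambda e: e[1][0])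
  let ordered := PySem.List.sorted (items.map (fun it => (pvGid it, (it.2.1, it.2.2))))
      (fun e => e.2.1) false
  -- {i: [p for g, p in ordered if g == i] for i in range(4)}
  ((PySem.List.pyRange 0 4 1).foldl
    (fun d i => d.insert i ((ordered.filter (fun e => e.1 == i)).map (fun e => e.2)))
    PySem.Dict.empty).items

-- ===== PRECONDITION & SPEC =====
-- Pre_ excludes exactly the inputs on which A raises: an item whose mid is empty or whose last
-- character is not one of '0'..'3' makes A raise IndexError, ValueError or KeyError.
def Pre_group_by_id (items : List (String × Int × String)) : Prop :=
  ∀ it ∈ items, it.1.toList.getLast? = some '0' ∨ it.1.toList.getLast? = some '1' ∨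
    it.1.toList.getLast? = some '2' ∨ it.1.toList.getLast? = some '3'
instance (items : List (String × Int × String)) : Decidable (Pre_group_by_id items) := by
  unfold Pre_group_by_id; infer_instance

def pvWitness_group_by_id : (List (String × Int × String)) :=
  [("a1", 5, "r"), ("b0", 2, "s"), ("c1", 1, "t")]

def Spec_group_by_id (items : List (String × Int × String)) (out : List (Int × List (Int × String))) : Prop := out = group_by_id_alt items
instance (items : List (String × Int × String)) (out : List (Int × List (Int × String))) : Decidable (Spec_group_by_id items out) := by unfold Spec_group_by_id; infer_instance

-- ===== CLAIM (what is proved, stated in full; the proofs are below) =====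
def Claim_equal_group_by_id : Prop := ∀ (items : List (String × Int × String)), Dom_group_by_id items → Pre_group_by_id items → Spec_group_by_id items (group_by_id items)

-- ===== LEMMAS AND PROOFS =====

-- an element strictly before every list element is inserted at the front
theorem insertBy_all_before {α : Type} (bef : α → α → Bool) (x : α) (l : List α)
    (h : ∀ z ∈ l, bef x z = true) :
    PySem.List.insertBy bef x l = x :: l := by
  cases l with
  | nil => rfl
  | cons y t => simp [PySem.List.insertBy, h y (by simp)]

-- insertBy preserves sortedness by the key
theorem pairwise_insertBy {α : Type} (key : α → Int) (x : α) (l : List α)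
    (h : l.Pairwise (fun a b => key a ≤ key b)) :
    (PySem.List.insertBy (fun a b => decide (key a < key b)) x l).Pairwise
      (fun a b => key a ≤ key b) := by
  induction l with
  | nil => simp [PySem.List.insertBy]
  | cons y t ih =>
    rw [List.pairwise_cons] at h
    by_cases hxy : key x < key y
    · simp only [PySem.List.insertBy, hxy, decide_true, if_true]
      refine List.pairwise_cons.2 ⟨?_, List.pairwise_cons.2 ⟨h.1, h.2⟩⟩
      intro z hz
      rcases List.mem_cons.1 hz with rfl | hz
      · omega
      · have := h.1 z hz; omega
    · simp only [PySem.List.insertBy, hxy, decide_false, Bool.false_eq_true, if_false]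
      refine List.pairwise_cons.2 ⟨?_, ih h.2⟩
      intro z hz
      rw [PySem.List.mem_insertBy] at hz
      rcases hz with rfl | hz
      · omega
      · exact h.1 z hz

-- stability: filtering commutes with inserting into a sorted list
theorem filter_insertBy {α : Type} (key : α → Int) (q : α → Bool) (x : α) (l : List α)
    (h : l.Pairwise (fun a b => key a ≤ key b)) :
    (PySem.List.insertBy (fun a b => decide (key a < key b)) x l).filter q
      = if q x then PySem.List.insertBy (fun a b => decide (key a < key b)) x (l.filter q)
        else l.filter q := by
  induction l with
  | nil => by_cases hqx : q x = true <;> simp [PySem.List.insertBy, hqx]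
  | cons y t ih =>
    rw [List.pairwise_cons] at h
    by_cases hxy : key x < key y
    · simp only [PySem.List.insertBy, hxy, decide_true, if_true]
      by_cases hqx : q x = true
      · rw [List.filter_cons_of_pos hqx, if_pos hqx,
          insertBy_all_before _ _ _ ?_]
        intro z hz
        rcases List.mem_cons.1 (List.mem_of_mem_filter hz) with rfl | hz'
        · simp [hxy]
        · have := h.1 z hz'; simp; omega
      · rw [List.filter_cons_of_neg (by simp_all), if_neg (by simp_all)]
    · simp only [PySem.List.insertBy, hxy, decide_false, Bool.false_eq_true, if_false]
      by_cases hqy : q y = true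
      · rw [List.filter_cons_of_pos hqy, List.filter_cons_of_pos hqy, ih h.2]
        by_cases hqx : q x = true
        · rw [if_pos hqx, if_pos hqx]
          conv_rhs => rw [PySem.List.insertBy]
          simp [hxy]
        · rw [if_neg (by simp_all), if_neg (by simp_all)]
      · rw [List.filter_cons_of_neg (by simp_all), List.filter_cons_of_neg (by simp_all), ih h.2]

theorem filter_foldl_insertBy {α : Type} (key : α → Int) (q : α → Bool) (l : List α)
    (acc : List α) (h : acc.Pairwise (fun a b => key a ≤ key b)) :
    (l.foldl (fun acc x => PySem.List.insertBy (fun a b => decide (key a < key b)) x acc) acc).filter q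
      = (l.filter q).foldl (fun acc x => PySem.List.insertBy (fun a b => decide (key a < key b)) x acc) (acc.filter q) := by
  induction l generalizing acc with
  | nil => simp
  | cons x t ih =>
    rw [List.foldl_cons, ih _ (pairwise_insertBy key x acc h), filter_insertBy key q x acc h]
    by_cases hqx : q x = true
    · rw [if_pos hqx, List.filter_cons_of_pos hqx, List.foldl_cons]
    · rw [if_neg (by simp_all), List.filter_cons_of_neg (by simp_all)]

-- stability: filtering commutes with a stable sort
theorem filter_sorted {α : Type} (key : α → Int) (q : α → Bool) (l : List α) :
    (PySem.List.sorted l key false).filter q = PySem.List.sorted (l.filter q) key false := by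
  rw [PySem.List.sorted_eq_foldl_insertBy, PySem.List.sorted_eq_foldl_insertBy,
    filter_foldl_insertBy key q l [] (by simp)]
  rfl

-- projecting the tagged pair away commutes with sorting when the key only reads the projection
theorem map_snd_insertBy {β γ : Type} (key : γ → Int) (x : β × γ) (l : List (β × γ)) :
    (PySem.List.insertBy (fun a b => decide (key a.2 < key b.2)) x l).map (fun e => e.2)
      = PySem.List.insertBy (fun a b => decide (key a < key b)) x.2 (l.map (fun e => e.2)) := by
  induction l with
  | nil => rfl
  | cons y t ih =>
    by_cases hk : key x.2 < key y.2
    · simp [PySem.List.insertBy, hk]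
    · simp only [PySem.List.insertBy, hk, decide_false, Bool.false_eq_true, if_false,
        List.map_cons, ih]

theorem map_snd_sorted {β γ : Type} (key : γ → Int) (l : List (β × γ)) :
    (PySem.List.sorted l (fun e => key e.2) false).map (fun e => e.2)
      = PySem.List.sorted (l.map (fun e => e.2)) key false := by
  rw [PySem.List.sorted_eq_foldl_insertBy, PySem.List.sorted_eq_foldl_insertBy]
  have : ∀ (acc : List (β × γ)),
      (l.foldl (fun acc x => PySem.List.insertBy (fun a b => decide (key a.2 < key b.2)) x acc) acc).map (fun e => e.2)
        = (l.map (fun e => e.2)).foldl (fun acc x => PySem.List.insertBy (fun a b => decide (key a < key b)) x acc) (acc.map (fun e => e.2)) := by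
    induction l with
    | nil => simp
    | cons x t ih => intro acc; rw [List.foldl_cons, ih, map_snd_insertBy, List.map_cons, List.foldl_cons]
  exact this []

-- Set.update adds nothing when every element is already present
theorem set_update_of_mem {α : Type} [BEq α] [LawfulBEq α] (s : PySem.Set α) (l : List α)
    (h : ∀ x ∈ l, s.contains x = true) : PySem.Set.update s l = s := by
  induction l with
  | nil => rfl
  | cons x t ih =>
    have hx : x ∈ s := by have := h x (by simp); simpa using this
    have : PySem.Set.add s x = s := by simp [PySem.Set.add, hx]
    simp only [PySem.Set.update, List.foldl_cons, this] at *
    exact ih (fun y hy => h y (by simp [hy]))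

-- under Pre_, every computed gid is one of the four preset keys
theorem pvGid_mem (it : String × Int × String)
    (h : it.1.toList.getLast? = some '0' ∨ it.1.toList.getLast? = some '1' ∨
      it.1.toList.getLast? = some '2' ∨ it.1.toList.getLast? = some '3') :
    pvGid it ∈ ([0, 1, 2, 3] : List Int) := by
  rcases h with h | h | h | h <;>
    · obtain ⟨ys, hys⟩ := List.getLast?_eq_some_iff.1 h
      simp [pvGid, hys]
      decide

-- the per-bucket identity behind the equivalence: sorting one bucket of the grouping loop
-- equals filtering that bucket out of the globally stable-sorted tagged list
theorem bucket_eq (key : Int) (L : List (Int × (Int × String))) :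
    PySem.List.sorted ((L.filter (fun e => e.1 == key)).map (fun e => e.2)) (fun x => x.1) false
      = ((PySem.List.sorted L (fun e => e.2.1) false).filter (fun e => e.1 == key)).map (fun e => e.2) := by
  rw [filter_sorted (fun e => e.2.1) (fun e => e.1 == key) L]
  exact (map_snd_sorted (fun p => p.1) (L.filter (fun e => e.1 == key))).symm

-- ===== VERDICT (by name: the statement is the Claim_ definition above) =====
theorem group_by_id_spec : Claim_equal_group_by_id := by
  intro items _ hpre
  unfold Spec_group_by_id group_by_id group_by_id_alt
  simp only []
  have hd0 : List.foldl (fun (d : PySem.Dict Int (List (Int × String))) i => d.insert i [])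
      PySem.Dict.empty (PySem.List.pyRange 0 4)
      = PySem.Dict.mk [(0,[]),(1,[]),(2,[]),(3,[])] := rfl
  have hfold : List.foldl (fun (d : PySem.Dict Int (List (Int × String))) it =>
        d.modify (pvGid it) [] fun l => l ++ [(it.2.1, it.2.2)])
      (PySem.Dict.mk [(0,[]),(1,[]),(2,[]),(3,[])]) items
      = List.foldl (fun d p => d.modify p.1 [] fun l => l ++ [p.2])
        (PySem.Dict.mk [(0,[]),(1,[]),(2,[]),(3,[])])
        (items.map (fun it => (pvGid it, (it.2.1, it.2.2)))) := by rw [List.foldl_map]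
  rw [hd0, hfold]
  set L := items.map (fun it => (pvGid it, (it.2.1, it.2.2))) with hL
  set d1 := List.foldl (fun d p => d.modify p.1 [] fun l => l ++ [p.2])
      (PySem.Dict.mk [(0,[]),(1,[]),(2,[]),(3,[])]) L with hd1
  have hkeys1 : d1.keys = [0, 1, 2, 3] := by
    rw [hd1, PySem.Dict.keys_foldl_modify_key L (fun p => p.1) [] (fun d p => fun l => l ++ [p.2])]
    refine set_update_of_mem _ _ ?_
    intro x hx
    rw [hL, List.map_map] at hx
    obtain ⟨it, hit, hxe⟩ := List.mem_map.1 hx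
    have hm := pvGid_mem it (hpre it hit)
    simp only [List.mem_cons, List.not_mem_nil, or_false] at hm
    have hxg : x = pvGid it := by rw [← hxe]; rfl
    rcases hm with h | h | h | h <;> rw [hxg, h] <;> decide
  rw [hkeys1]
  set v := fun (i : Int) => ((PySem.List.sorted L (fun e => e.2.1) false).filter (fun e => e.1 == i)).map (fun e => e.2) with hv
  set d2 := List.foldl (fun d gid => d.modify gid [] fun l => PySem.List.sorted l (fun x => x.1) false) d1 ([0,1,2,3] : List Int) with hd2
  have hkeys2 : d2.keys = [0, 1, 2, 3] := by
    rw [hd2, PySem.Dict.keys_foldl_modify_key ([0,1,2,3] : List Int) (fun g => g) []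
      (fun (d : PySem.Dict Int (List (Int × String))) (g : Int) =>
        fun l => PySem.List.sorted l (fun x : Int × String => x.1) false), hkeys1]
    decide
  have hB : (List.foldl (fun d i => d.insert i (v i)) PySem.Dict.empty ([0,1,2,3] : List Int)).items
      = ([0,1,2,3] : List Int).map (fun i => (i, v i)) := by
    rw [PySem.Dict.items_foldl_insert_fresh ([0,1,2,3] : List Int) (fun i => i) v PySem.Dict.empty
      (by intro a _; simp) (by decide)]
    rfl
  have hpy : PySem.List.pyRange 0 4 1 = ([0,1,2,3] : List Int) := by decide
  rw [hpy, hB]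
  rw [PySem.Dict.items_eq_map_keys d2 (by rw [hkeys2]; decide) [], hkeys2]
  have hbk : ∀ k : Int, d1.getD k [] = (PySem.Dict.mk ([(0,[]),(1,[]),(2,[]),(3,[])] : List (Int × List (Int × String)))).getD k []
      ++ (L.filter (fun p => p.1 == k)).map (fun x => x.2) := by
    intro k; rw [hd1]; exact PySem.Dict.getD_foldl_modify_append L _ k
  have hg : ∀ k : Int, d2.getD k [] = if k = 3 then PySem.List.sorted (d1.getD 3 []) (fun x => x.1) false
      else if k = 2 then PySem.List.sorted (d1.getD 2 []) (fun x => x.1) false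
      else if k = 1 then PySem.List.sorted (d1.getD 1 []) (fun x => x.1) false
      else if k = 0 then PySem.List.sorted (d1.getD 0 []) (fun x => x.1) false
      else d1.getD k [] := by
    intro k
    rw [hd2]
    simp only [List.foldl_cons, List.foldl_nil, PySem.Dict.getD_modify]
    split_ifs <;> simp_all
  simp only [List.map_cons, List.map_nil, hg]
  norm_num
  have hemp : ∀ k ∈ ([0,1,2,3] : List Int),
      (PySem.Dict.mk ([(0,[]),(1,[]),(2,[]),(3,[])] : List (Int × List (Int × String)))).getD k [] = [] := by decide
  refine ⟨?_, ?_, ?_, ?_⟩ <;>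
  · rw [hbk, hemp _ (by decide), List.nil_append]
    simp only [hv]
    exact bucket_eq _ L
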